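-- pv_equiv track=rewrite | github.com/steveyoung-random/cassiel-legal-workbench | cfr_set_parse.py | context_matches
-- ===== SOURCE A (Python) =====
-- from typing import Dict, Any, List, Optional, Tuple
--
-- def context_matches(specific_units: Dict[str, str], context: List[Dict[str, str]]) -> bool:
--     """Check if context matches specific unit filter."""
--     if not specific_units:
--         return True
--     flat_context = {}
--     for entry in context:
--         for k, v in entry.items():
--             flat_context[k] = v
--     for key, value in specific_units.items():
--         if key not in flat_context:
--             return False
--         if str(flat_context[key]).strip() != str(value).strip():
--             return False
--     return True
-- ===== SOURCE B (Python) =====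
-- def context_matches(specific_units, context):
--     """Check if context matches specific unit filter."""
--     if not specific_units:
--         return True
--     for key, value in specific_units.items():
--         for entry in reversed(context):
--             if key in entry:
--                 if str(entry[key]).strip() != str(value).strip():
--                     return False
--                 break
--         else:
--             return False
--     return True
-- ===== Notes on version B (the rewrite author's own statement) =====
-- stated objective: simpler
-- what changed: Instead of flattening all context dicts into one merged dict up front, B scans context in reverse per filter key (last occurrence wins, matching dict-override semantics) and compares directly, with no intermediate dict.
import Mathlib
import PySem

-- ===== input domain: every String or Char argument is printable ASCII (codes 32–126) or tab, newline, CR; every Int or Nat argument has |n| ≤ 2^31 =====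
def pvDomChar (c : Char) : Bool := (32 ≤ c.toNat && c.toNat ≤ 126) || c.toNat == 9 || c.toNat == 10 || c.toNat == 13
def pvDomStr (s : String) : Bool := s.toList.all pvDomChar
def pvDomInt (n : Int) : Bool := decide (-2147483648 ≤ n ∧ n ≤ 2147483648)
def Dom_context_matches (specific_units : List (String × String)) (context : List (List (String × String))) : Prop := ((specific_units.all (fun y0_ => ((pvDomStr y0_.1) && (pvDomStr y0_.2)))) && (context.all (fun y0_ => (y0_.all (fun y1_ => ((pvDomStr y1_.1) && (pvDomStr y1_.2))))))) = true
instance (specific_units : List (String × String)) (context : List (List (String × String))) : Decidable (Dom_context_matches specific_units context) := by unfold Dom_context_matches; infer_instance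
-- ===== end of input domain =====

-- B drops A's up-front flattening dict: per filter key it scans context in reverse for the
-- last entry holding the key (same override semantics) and compares directly; same results, no merged dict.

-- ===== PORT A =====
-- flat_context = {}; for entry in context: for k, v in entry.items(): flat_context[k] = v
def pvFlatten (context : List (List (String × String))) : PySem.Dict String String :=
  context.foldl (fun d entry => entry.foldl (fun d kv => d.insert kv.1 kv.2) d) PySem.Dict.empty

-- for key, value in specific_units.items(): the two early-return checks
def pvCheckA (flat : PySem.Dict String String) : List (String × String) → Bool
  | [] => true
  | (k, v) :: rest =>
    if !(flat.contains k) then false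
    else if !(PySem.Str.strip (flat.getD k "") == PySem.Str.strip v) then false
    else pvCheckA flat rest

def context_matches (specific_units : List (String × String)) (context : List (List (String × String))) : Bool :=
  if specific_units.isEmpty then true
  else pvCheckA (pvFlatten context) (PySem.Dict.ofList specific_units).items

-- ===== PORT B =====
-- for entry in reversed(context): if key in entry: … break / else: not found
-- (each context entry is a Python dict, so its lookup is PySem.Dict.ofList entry)
def pvRevFind : List (List (String × String)) → String → Option String
  | [], _ => none
  | e :: rest, k =>
    match (PySem.Dict.ofList e).get? k with
    | some v => some v
    | none => pvRevFind rest k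

def context_matches_alt (specific_units : List (String × String)) (context : List (List (String × String))) : Bool :=
  if specific_units.isEmpty then true
  else (PySem.Dict.ofList specific_units).items.all (fun kv =>
    match pvRevFind context.reverse kv.1 with
    | none => false
    | some f => PySem.Str.strip f == PySem.Str.strip kv.2)

-- ===== PRECONDITION & SPEC =====
def Spec_context_matches (specific_units : List (String × String)) (context : List (List (String × String))) (out : Bool) : Prop := out = context_matches_alt specific_units context
instance (specific_units : List (String × String)) (context : List (List (String × String))) (out : Bool) : Decidable (Spec_context_matches specific_units context out) := by unfold Spec_context_matches; infer_instance

-- ===== CLAIM (what is proved, stated in full; the proofs are below) =====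
def Claim_equal_context_matches : Prop := ∀ (specific_units : List (String × String)) (context : List (List (String × String))), Dom_context_matches specific_units context → Spec_context_matches specific_units context (context_matches specific_units context)

-- ===== LEMMAS AND PROOFS =====

-- folding one entry's pairs into d looks up as: the entry's own dict first, then d
theorem pv_foldl_insert_get? (e : List (String × String)) (d : PySem.Dict String String) (k : String) :
    (e.foldl (fun d kv => d.insert kv.1 kv.2) d).get? k
      = ((PySem.Dict.ofList e).get? k).or (d.get? k) := by
  induction e generalizing d with
  | nil => simp [PySem.Dict.ofList, PySem.Dict.update]
  | cons p rest ih =>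
    simp only [List.foldl_cons, ih]
    have h2 : (PySem.Dict.ofList (p :: rest)).get? k
        = ((PySem.Dict.ofList rest).get? k).or ((PySem.Dict.empty.insert p.1 p.2).get? k) := by
      show ((PySem.Dict.empty.insert p.1 p.2).update rest).get? k = _
      simpa [PySem.Dict.update] using ih (PySem.Dict.empty.insert p.1 p.2)
    rw [h2, Option.or_assoc]
    rw [PySem.Dict.get?_insert, PySem.Dict.get?_insert]
    by_cases hk : k = p.1 <;> simp [hk, PySem.Dict.get?_empty]

theorem pv_revFind_append (xs ys : List (List (String × String))) (k : String) :
    pvRevFind (xs ++ ys) k = (pvRevFind xs k).or (pvRevFind ys k) := by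
  induction xs with
  | nil => simp [pvRevFind]
  | cons e rest ih =>
    simp only [List.cons_append, pvRevFind, ih]
    cases (PySem.Dict.ofList e).get? k <;> simp

-- the flattened dict's lookup is B's reverse scan
theorem pv_flatten_get? (context : List (List (String × String))) (k : String) :
    (pvFlatten context).get? k = pvRevFind context.reverse k := by
  suffices h : ∀ (ctx : List (List (String × String))) (d : PySem.Dict String String),
      (ctx.foldl (fun d entry => entry.foldl (fun d kv => d.insert kv.1 kv.2) d) d).get? k
        = (pvRevFind ctx.reverse k).or (d.get? k) by
    simpa [pvFlatten, PySem.Dict.get?_empty] using h context PySem.Dict.empty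
  intro ctx
  induction ctx with
  | nil => intro d; simp [pvRevFind]
  | cons e rest ih =>
    intro d
    simp only [List.foldl_cons, ih, pv_foldl_insert_get?, List.reverse_cons, pv_revFind_append]
    have : pvRevFind [e] k = (PySem.Dict.ofList e).get? k := by
      simp only [pvRevFind]; cases (PySem.Dict.ofList e).get? k <;> rfl
    rw [this, Option.or_assoc]

-- A's early-return loop is an all over lookups
theorem pv_checkA_eq_all (flat : PySem.Dict String String) (l : List (String × String)) :
    pvCheckA flat l = l.all (fun kv =>
      match flat.get? kv.1 with
      | none => false
      | some f => PySem.Str.strip f == PySem.Str.strip kv.2) := by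
  induction l with
  | nil => rfl
  | cons p rest ih =>
    obtain ⟨k, v⟩ := p
    simp only [pvCheckA, List.all_cons, ih, PySem.Dict.contains_eq_isSome_get?,
      PySem.Dict.getD_eq_get?_getD]
    cases h : flat.get? k with
    | none => simp
    | some f =>
      simp only [Option.isSome_some, Option.getD_some, Bool.not_true]
      by_cases hs : PySem.Str.strip f == PySem.Str.strip v <;> simp [hs]

-- ===== VERDICT (by name: the statement is the Claim_ definition above) =====
theorem context_matches_spec : Claim_equal_context_matches := by
  intro su ctx _
  unfold Spec_context_matches context_matches context_matches_alt
  by_cases h : su.isEmpty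
  · simp [h]
  · simp only [h]
    rw [pv_checkA_eq_all]
    simp only [pv_flatten_get?]
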